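-- pv_equiv track=rewrite | github.com/mortazavilab/agoutic | cortex/remote_orchestration.py | _workflow_status
-- ===== SOURCE A (Python) =====
-- def _workflow_status(payload: dict) -> str:
--     steps = payload.get("steps", [])
--     if any(step.get("status") == "FAILED" for step in steps):
--         return "FAILED"
--     if any(step.get("status") == "FOLLOW_UP" for step in steps):
--         return "FOLLOW_UP"
--     if steps and all(step.get("status") in {"COMPLETED", "CANCELLED"} for step in steps if step.get("id")):
--         if any(step.get("status") == "CANCELLED" for step in steps):
--             return "CANCELLED"
--         return "COMPLETED"
--     if all(step.get("status") == "COMPLETED" for step in steps if step.get("id")) and steps: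
--         return "COMPLETED"
--     if any(step.get("status") == "RUNNING" for step in steps):
--         return "RUNNING"
--     return "PENDING"
-- ===== SOURCE B (Python) =====
-- def _workflow_status(payload: dict) -> str:
--     steps = payload.get("steps", [])
--     has_failed = has_followup = has_cancelled = has_running = False
--     all_id_done = all_id_completed = True
--     for step in steps:
--         s = step.get("status")
--         if s == "FAILED":
--             has_failed = True
--         if s == "FOLLOW_UP":
--             has_followup = True
--         if s == "CANCELLED":
--             has_cancelled = True
--         if s == "RUNNING":
--             has_running = True
--         if step.get("id"):
--             if s not in ("COMPLETED", "CANCELLED"):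
--                 all_id_done = False
--             if s != "COMPLETED":
--                 all_id_completed = False
--     if has_failed:
--         return "FAILED"
--     if has_followup:
--         return "FOLLOW_UP"
--     if steps and all_id_done:
--         return "CANCELLED" if has_cancelled else "COMPLETED"
--     if all_id_completed and steps:
--         return "COMPLETED"
--     if has_running:
--         return "RUNNING"
--     return "PENDING"
-- ===== Notes on version B (the rewrite author's own statement) =====
-- stated objective: simpler
-- what changed: Replaces A's five separate any/all scans over the step list with one accumulating pass that tallies six flags, followed by the same decision cascade on the precomputed flags.
import Mathlib
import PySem

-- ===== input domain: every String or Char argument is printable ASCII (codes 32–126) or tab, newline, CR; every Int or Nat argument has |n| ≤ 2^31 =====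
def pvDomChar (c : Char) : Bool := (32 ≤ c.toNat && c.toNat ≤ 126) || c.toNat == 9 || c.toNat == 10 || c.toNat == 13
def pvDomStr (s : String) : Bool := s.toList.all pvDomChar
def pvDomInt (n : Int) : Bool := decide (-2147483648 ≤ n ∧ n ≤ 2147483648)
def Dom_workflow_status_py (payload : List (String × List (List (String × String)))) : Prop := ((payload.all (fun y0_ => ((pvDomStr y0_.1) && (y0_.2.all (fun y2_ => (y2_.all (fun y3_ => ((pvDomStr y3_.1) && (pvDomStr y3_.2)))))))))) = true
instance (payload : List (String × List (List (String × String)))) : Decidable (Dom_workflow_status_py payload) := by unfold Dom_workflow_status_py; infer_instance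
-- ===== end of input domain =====

-- B replaces A's five separate any/all scans with one accumulating pass over the steps
-- tallying six flags, then the same decision cascade on the flags (objective: simpler, one pass).

-- dict.get on an association list: first match (exact for Python dict.get)
def pvGetA (st : List (String × String)) (k : String) : Option String :=
  (st.find? (fun p => p.1 == k)).map (·.2)

-- step.get("id") truthiness: present and nonempty string
def pvIdTruthyA (st : List (String × String)) : Bool :=
  match pvGetA st "id" with
  | some s => decide (s ≠ "")
  | none => false

-- ===== PORT A =====
def workflow_status_py (payload : List (String × List (List (String × String)))) : String :=
  let steps := ((payload.find? (fun p => p.1 == "steps")).map (·.2)).getD []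
  if steps.any (fun st => pvGetA st "status" == some "FAILED") then "FAILED"
  else if steps.any (fun st => pvGetA st "status" == some "FOLLOW_UP") then "FOLLOW_UP"
  else if (!steps.isEmpty) && (steps.filter pvIdTruthyA).all
      (fun st => pvGetA st "status" == some "COMPLETED" || pvGetA st "status" == some "CANCELLED") then
    (if steps.any (fun st => pvGetA st "status" == some "CANCELLED") then "CANCELLED" else "COMPLETED")
  else if ((steps.filter pvIdTruthyA).all (fun st => pvGetA st "status" == some "COMPLETED")) && (!steps.isEmpty) then "COMPLETED"
  else if steps.any (fun st => pvGetA st "status" == some "RUNNING") then "RUNNING"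
  else "PENDING"

-- ===== PORT B =====
-- the loop body of Source B: update the six flags for one step
def pvFlagStep (acc : Bool × Bool × Bool × Bool × Bool × Bool) (st : List (String × String)) :
    Bool × Bool × Bool × Bool × Bool × Bool :=
  let s := pvGetA st "status"
  let hf := if s == some "FAILED" then true else acc.1
  let hu := if s == some "FOLLOW_UP" then true else acc.2.1
  let hc := if s == some "CANCELLED" then true else acc.2.2.1
  let hr := if s == some "RUNNING" then true else acc.2.2.2.1
  let ad := if pvIdTruthyA st && !(s == some "COMPLETED" || s == some "CANCELLED") then false else acc.2.2.2.2.1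
  let ac := if pvIdTruthyA st && !(s == some "COMPLETED") then false else acc.2.2.2.2.2
  (hf, hu, hc, hr, ad, ac)

def workflow_status_py_alt (payload : List (String × List (List (String × String)))) : String :=
  let steps := ((payload.find? (fun p => p.1 == "steps")).map (·.2)).getD []
  let fl := steps.foldl pvFlagStep (false, false, false, false, true, true)
  if fl.1 then "FAILED"
  else if fl.2.1 then "FOLLOW_UP"
  else if (!steps.isEmpty) && fl.2.2.2.2.1 then
    (if fl.2.2.1 then "CANCELLED" else "COMPLETED")
  else if fl.2.2.2.2.2 && (!steps.isEmpty) then "COMPLETED"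
  else if fl.2.2.2.1 then "RUNNING"
  else "PENDING"

-- ===== PRECONDITION & SPEC =====
def Spec_workflow_status_py (payload : List (String × List (List (String × String)))) (out : String) : Prop := out = workflow_status_py_alt payload
instance (payload : List (String × List (List (String × String)))) (out : String) : Decidable (Spec_workflow_status_py payload out) := by unfold Spec_workflow_status_py; infer_instance

-- ===== CLAIM (what is proved, stated in full; the proofs are below) =====
def Claim_equal_workflow_status_py : Prop := ∀ (payload : List (String × List (List (String × String)))), Dom_workflow_status_py payload → Spec_workflow_status_py payload (workflow_status_py payload)

-- ===== LEMMAS AND PROOFS =====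

-- (if b then true else x) / (if b then false else x) as or/and, for the flag updates
theorem pv_if_true (b x : Bool) : (if b = true then true else x) = (x || b) := by
  cases b <;> cases x <;> rfl
theorem pv_if_false (b x : Bool) : (if b = true then false else x) = (x && !b) := by
  cases b <;> cases x <;> rfl

-- the single fold computes exactly A's five scans (and the all-COMPLETED scan)
theorem pvFold_char (steps : List (List (String × String))) (acc : Bool × Bool × Bool × Bool × Bool × Bool) :
    steps.foldl pvFlagStep acc =
      (acc.1 || steps.any (fun st => pvGetA st "status" == some "FAILED"),
       acc.2.1 || steps.any (fun st => pvGetA st "status" == some "FOLLOW_UP"),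
       acc.2.2.1 || steps.any (fun st => pvGetA st "status" == some "CANCELLED"),
       acc.2.2.2.1 || steps.any (fun st => pvGetA st "status" == some "RUNNING"),
       acc.2.2.2.2.1 && (steps.filter pvIdTruthyA).all
         (fun st => pvGetA st "status" == some "COMPLETED" || pvGetA st "status" == some "CANCELLED"),
       acc.2.2.2.2.2 && (steps.filter pvIdTruthyA).all (fun st => pvGetA st "status" == some "COMPLETED")) := by
  induction steps generalizing acc with
  | nil => simp
  | cons st rest ih =>
    obtain ⟨hf, hu, hc, hr, ad, ac⟩ := acc
    simp only [List.foldl_cons, ih, pvFlagStep, pv_if_true, pv_if_false,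
      List.any_cons, List.filter_cons]
    by_cases h : pvIdTruthyA st = true <;>
      simp [h, Bool.or_assoc, Bool.and_assoc]

-- ===== VERDICT (by name: the statement is the Claim_ definition above) =====
theorem workflow_status_py_spec : Claim_equal_workflow_status_py := by
  intro payload _
  unfold Spec_workflow_status_py workflow_status_py workflow_status_py_alt
  simp only [pvFold_char, Bool.false_or, Bool.true_and]
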